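-- pv_equiv track=rewrite | github.com/AdamSlay/luxai-S2-agent | lib/utils.py | get_lichen_in_square
-- ===== SOURCE A (Python) =====
-- def get_lichen_in_square(lichen_tiles, player_strains, pos, size):
--     x_center, y_center = pos
--     half_size = size // 2
--     x_min, x_max = max(0, x_center - half_size), min(48, x_center + half_size + 1)
--     y_min, y_max = max(0, y_center - half_size), min(48, y_center + half_size + 1)
--
--     square_tiles = []
--     for x in range(x_min, x_max):
--         for y in range(y_min, y_max):
--             if (x, y) in lichen_tiles and lichen_tiles[x, y] in player_strains:
--                 square_tiles.append((x, y))
--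
--     return square_tiles
-- ===== SOURCE B (Python) =====
-- def get_lichen_in_square(lichen_tiles, player_strains, pos, size):
--     x_center, y_center = pos
--     half_size = size // 2
--     x_min, x_max = max(0, x_center - half_size), min(48, x_center + half_size + 1)
--     y_min, y_max = max(0, y_center - half_size), min(48, y_center + half_size + 1)
--
--     matches = [(x, y) for (x, y), strain in lichen_tiles.items()
--                if x_min <= x < x_max and y_min <= y < y_max and strain in player_strains]
--     return sorted(matches)
-- ===== Notes on version B (the rewrite author's own statement) =====
-- stated objective: alternative
-- what changed: Replaces the nested scan over every cell of the clamped square (dict lookup per cell) by a single pass over the dict's populated tiles, filtering by the bounds and strain set and sorting the matches to reproduce the x-then-y order.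
import Mathlib
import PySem

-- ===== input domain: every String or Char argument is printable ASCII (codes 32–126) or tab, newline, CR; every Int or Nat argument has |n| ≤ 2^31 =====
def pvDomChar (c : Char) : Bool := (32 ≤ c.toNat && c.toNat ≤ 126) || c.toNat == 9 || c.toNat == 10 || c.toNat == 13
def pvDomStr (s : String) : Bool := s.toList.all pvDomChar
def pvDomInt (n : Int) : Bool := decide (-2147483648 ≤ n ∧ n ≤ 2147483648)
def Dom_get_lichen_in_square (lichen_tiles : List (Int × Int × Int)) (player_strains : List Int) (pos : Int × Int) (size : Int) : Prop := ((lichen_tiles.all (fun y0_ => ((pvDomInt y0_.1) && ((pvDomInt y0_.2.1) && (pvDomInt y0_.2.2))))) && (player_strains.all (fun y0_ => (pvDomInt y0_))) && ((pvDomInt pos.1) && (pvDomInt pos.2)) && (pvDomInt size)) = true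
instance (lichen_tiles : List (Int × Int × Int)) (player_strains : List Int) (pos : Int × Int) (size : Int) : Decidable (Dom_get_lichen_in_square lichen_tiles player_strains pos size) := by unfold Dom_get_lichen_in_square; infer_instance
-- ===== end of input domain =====

-- B replaces A's nested scan over every cell of the clamped square by one pass over the
-- dict's populated tiles, filtered by bounds and strains, then sorted to A's x-then-y order.

-- ===== PORT A =====
-- the Python dict argument (assoc list (x, y, strain)) as a PySem.Dict keyed by (x, y)
def pvDictOf (lichen_tiles : List (Int × Int × Int)) : PySem.Dict (Int × Int) Int :=
  PySem.Dict.ofList (lichen_tiles.map (fun t => ((t.1, t.2.1), t.2.2)))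

def get_lichen_in_square (lichen_tiles : List (Int × Int × Int)) (player_strains : List Int) (pos : Int × Int) (size : Int) : List (Int × Int) :=
  let d := pvDictOf lichen_tiles
  let x_center := pos.1
  let y_center := pos.2
  let half_size := PySem.Int.floordiv size 2
  let x_min := max 0 (x_center - half_size)
  let x_max := min 48 (x_center + half_size + 1)
  let y_min := max 0 (y_center - half_size)
  let y_max := min 48 (y_center + half_size + 1)
  -- '(x, y) in lichen_tiles and lichen_tiles[x, y] in player_strains': the guarded subscript
  (PySem.List.pyRange x_min x_max 1).foldl (fun square_tiles x =>
    (PySem.List.pyRange y_min y_max 1).foldl (fun square_tiles y =>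
      if (match d.get? (x, y) with
          | some v => player_strains.contains v
          | none => false) then square_tiles ++ [(x, y)] else square_tiles)
      square_tiles) []

-- ===== PORT B =====
def get_lichen_in_square_alt (lichen_tiles : List (Int × Int × Int)) (player_strains : List Int) (pos : Int × Int) (size : Int) : List (Int × Int) :=
  let d := pvDictOf lichen_tiles
  let x_center := pos.1
  let y_center := pos.2
  let half_size := PySem.Int.floordiv size 2
  let x_min := max 0 (x_center - half_size)
  let x_max := min 48 (x_center + half_size + 1)
  let y_min := max 0 (y_center - half_size)
  let y_max := min 48 (y_center + half_size + 1)
  let found := (d.items.filter (fun p =>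
      decide (x_min ≤ p.1.1) && decide (p.1.1 < x_max) &&
      decide (y_min ≤ p.1.2) && decide (p.1.2 < y_max) &&
      player_strains.contains p.2)).map (fun p => p.1)
  -- sorted(matches): Python's tuple order is the lexicographic order
  PySem.List.sorted found (fun q => (toLex q : Lex (Int × Int))) false

-- ===== PRECONDITION & SPEC =====
def Spec_get_lichen_in_square (lichen_tiles : List (Int × Int × Int)) (player_strains : List Int) (pos : Int × Int) (size : Int) (out : List (Int × Int)) : Prop := out = get_lichen_in_square_alt lichen_tiles player_strains pos size
instance (lichen_tiles : List (Int × Int × Int)) (player_strains : List Int) (pos : Int × Int) (size : Int) (out : List (Int × Int)) : Decidable (Spec_get_lichen_in_square lichen_tiles player_strains pos size out) := by unfold Spec_get_lichen_in_square; infer_instance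

-- ===== CLAIM (what is proved, stated in full; the proofs are below) =====
def Claim_equal_get_lichen_in_square : Prop := ∀ (lichen_tiles : List (Int × Int × Int)) (player_strains : List Int) (pos : Int × Int) (size : Int), Dom_get_lichen_in_square lichen_tiles player_strains pos size → Spec_get_lichen_in_square lichen_tiles player_strains pos size (get_lichen_in_square lichen_tiles player_strains pos size)

-- ===== LEMMAS AND PROOFS =====

theorem pvInner (C : List Int) (x : Int) (P : Int × Int → Bool) (init : List (Int × Int)) :
    C.foldl (fun acc y => if P (x, y) then acc ++ [(x, y)] else acc) init
      = init ++ (C.map (fun y => (x, y))).filter P := by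
  rw [PySem.List.foldl_append_if (fun y => P (x, y)) (fun y => (x, y)), List.filter_map]
  rfl

theorem pvNestedFoldl (R C : List Int) (P : Int × Int → Bool) (init : List (Int × Int)) :
    R.foldl (fun acc x => C.foldl (fun acc y => if P (x, y) then acc ++ [(x, y)] else acc) acc) init
      = init ++ (R.flatMap (fun x => C.map (fun y => (x, y)))).filter P := by
  simp only [pvInner]
  rw [PySem.List.foldl_append_eq_flatMap, List.filter_flatMap]

theorem pvProdPairwise (R C : List Int) (hR : R.Pairwise (· < ·)) (hC : C.Pairwise (· < ·)) :
    (R.flatMap (fun x => C.map (fun y => (x, y)))).Pairwise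
      (fun a b => (toLex a : Lex (Int × Int)) < toLex b) := by
  induction R with
  | nil => simp
  | cons x R ih =>
      rw [List.pairwise_cons] at hR
      simp only [List.flatMap_cons]
      rw [List.pairwise_append]
      refine ⟨?_, ih hR.2, ?_⟩
      · rw [List.pairwise_map]
        refine hC.imp ?_
        intro a b hab
        rw [Prod.Lex.lt_iff]
        exact Or.inr ⟨rfl, hab⟩
      · intro a ha b hb
        simp only [List.mem_map] at ha
        obtain ⟨y, -, rfl⟩ := ha
        simp only [List.mem_flatMap, List.mem_map] at hb
        obtain ⟨x', hx', y', -, rfl⟩ := hb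
        rw [Prod.Lex.lt_iff]
        exact Or.inl (hR.1 x' hx')

theorem pvMain (d : PySem.Dict (Int × Int) Int) (hnd : d.keys.Nodup) (strains : List Int)
    (xmin xmax ymin ymax : Int) :
    (PySem.List.pyRange xmin xmax 1).foldl (fun acc x =>
      (PySem.List.pyRange ymin ymax 1).foldl (fun acc y =>
        if (match d.get? (x, y) with | some v => strains.contains v | none => false)
        then acc ++ [(x, y)] else acc) acc) []
    = PySem.List.sorted ((d.items.filter (fun p =>
        decide (xmin ≤ p.1.1) && decide (p.1.1 < xmax) &&
        decide (ymin ≤ p.1.2) && decide (p.1.2 < ymax) &&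
        strains.contains p.2)).map (fun p => p.1))
      (fun q => (toLex q : Lex (Int × Int))) false := by
  have hA := pvNestedFoldl (PySem.List.pyRange xmin xmax 1) (PySem.List.pyRange ymin ymax 1)
      (fun a => match d.get? a with | some v => strains.contains v | none => false) []
  rw [List.nil_append] at hA
  rw [hA]
  have hpairProd := pvProdPairwise (PySem.List.pyRange xmin xmax 1)
      (PySem.List.pyRange ymin ymax 1)
      (PySem.List.pairwise_lt_pyRange_one xmin xmax)
      (PySem.List.pairwise_lt_pyRange_one ymin ymax)
  have hys : (((PySem.List.pyRange xmin xmax 1).flatMap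
      (fun x => (PySem.List.pyRange ymin ymax 1).map (fun y => (x, y)))).filter
        (fun a => match d.get? a with | some v => strains.contains v | none => false)).Nodup := by
    refine List.Nodup.filter _ (hpairProd.imp ?_)
    intro a b hlt heq
    subst heq
    exact lt_irrefl _ hlt
  have hxs : ((d.items.filter (fun p =>
        decide (xmin ≤ p.1.1) && decide (p.1.1 < xmax) &&
        decide (ymin ≤ p.1.2) && decide (p.1.2 < ymax) &&
        strains.contains p.2)).map (fun p => p.1)).Nodup := by
    refine List.Nodup.sublist (List.Sublist.map _ List.filter_sublist) ?_
    simpa [PySem.Dict.keys] using hnd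
  have hmem : ∀ a, a ∈ (((PySem.List.pyRange xmin xmax 1).flatMap
      (fun x => (PySem.List.pyRange ymin ymax 1).map (fun y => (x, y)))).filter
        (fun a => match d.get? a with | some v => strains.contains v | none => false))
      ↔ a ∈ ((d.items.filter (fun p =>
        decide (xmin ≤ p.1.1) && decide (p.1.1 < xmax) &&
        decide (ymin ≤ p.1.2) && decide (p.1.2 < ymax) &&
        strains.contains p.2)).map (fun p => p.1)) := by
    intro a
    constructor
    · intro h
      rw [List.mem_filter] at h
      obtain ⟨hin, hP⟩ := h
      simp only [List.mem_flatMap, List.mem_map, PySem.List.mem_pyRange_one] at hin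
      obtain ⟨x, ⟨hx1, hx2⟩, y, ⟨hy1, hy2⟩, rfl⟩ := hin
      cases hget : d.get? (x, y) with
      | none => rw [hget] at hP; simp at hP
      | some v =>
        rw [hget] at hP
        simp only [List.contains_eq_mem, decide_eq_true_eq] at hP
        refine List.mem_map.mpr ⟨((x, y), v), List.mem_filter.mpr ⟨?_, ?_⟩, rfl⟩
        · exact (PySem.Dict.get?_eq_some_iff_mem_items d (x, y) v hnd).mp hget
        · simp [hx1, hx2, hy1, hy2, hP]
    · intro h
      obtain ⟨p, hp, rfl⟩ := List.mem_map.mp h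
      rw [List.mem_filter] at hp
      obtain ⟨hitems, hpred⟩ := hp
      simp only [Bool.and_eq_true, decide_eq_true_eq] at hpred
      obtain ⟨⟨⟨⟨hx1, hx2⟩, hy1⟩, hy2⟩, hv⟩ := hpred
      have hget : d.get? p.1 = some p.2 :=
        (PySem.Dict.get?_eq_some_iff_mem_items d p.1 p.2 hnd).mpr (by simpa using hitems)
      rw [List.mem_filter]
      constructor
      · simp only [List.mem_flatMap, List.mem_map, PySem.List.mem_pyRange_one]
        exact ⟨p.1.1, ⟨hx1, hx2⟩, p.1.2, ⟨hy1, hy2⟩, rfl⟩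
      · rw [hget]
        exact hv
  exact (PySem.List.sorted_eq_of_perm_of_pairwise_lt _ _ _
    ((List.perm_ext_iff_of_nodup hys hxs).mpr hmem) (hpairProd.filter _)).symm

-- ===== VERDICT (by name: the statement is the Claim_ definition above) =====
theorem get_lichen_in_square_spec : Claim_equal_get_lichen_in_square := by
  intro lichen_tiles player_strains pos size _
  show get_lichen_in_square lichen_tiles player_strains pos size
      = get_lichen_in_square_alt lichen_tiles player_strains pos size
  simp only [get_lichen_in_square, get_lichen_in_square_alt]
  exact pvMain (pvDictOf lichen_tiles) (PySem.Dict.nodup_keys_ofList _) player_strains _ _ _ _
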